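-- pv_equiv track=rewrite | github.com/sueszli/vector-database-benchmark | dataset/python-mutated/kwargs_insertion.py | find_insert_pos_for_kwargs
-- ===== SOURCE A (Python) =====
-- def find_insert_pos_for_kwargs(lines: list[str]) -> int:
--     if False:
--         return 10
--     'Finds the correct position to insert the keyword arguments and returns the index.'
--     for (idx, value) in reversed(list(enumerate(lines))):
--         if value.startswith('Returns'):
--             return idx
--     else:
--         return False
-- ===== SOURCE B (Python) =====
-- def find_insert_pos_for_kwargs(lines: list[str]) -> int:
--     'Finds the correct position to insert the keyword arguments and returns the index.'
--     pos = False
--     for idx, value in enumerate(lines):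
--         if value.startswith('Returns'):
--             pos = idx
--     return pos
-- ===== Notes on version B (the rewrite author's own statement) =====
-- stated objective: simpler
-- what changed: Replaced the reverse scan with early return (reversed(list(enumerate(lines)))) by a single forward pass keeping a last-match accumulator initialized to False. Pre_ excludes inputs with no matching line, where A returns the bool False instead of an int.
-- outside the precondition, e.g. on find_insert_pos_for_kwargs([]): A returns False, B returns False; on find_insert_pos_for_kwargs(['no match']): A returns False, B returns False
import Mathlib
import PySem

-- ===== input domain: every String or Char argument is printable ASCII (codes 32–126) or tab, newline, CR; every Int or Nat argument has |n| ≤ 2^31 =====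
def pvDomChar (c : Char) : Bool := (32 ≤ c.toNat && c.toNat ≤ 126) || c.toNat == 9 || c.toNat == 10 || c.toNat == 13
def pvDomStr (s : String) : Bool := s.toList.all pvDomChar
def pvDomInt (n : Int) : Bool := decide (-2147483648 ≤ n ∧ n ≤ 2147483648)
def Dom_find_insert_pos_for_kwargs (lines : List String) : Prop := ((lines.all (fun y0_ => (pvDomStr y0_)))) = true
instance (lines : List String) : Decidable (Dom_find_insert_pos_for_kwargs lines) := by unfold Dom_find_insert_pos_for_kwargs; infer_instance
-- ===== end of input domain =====

-- B replaces A's reverse scan with early return by one forward pass with a last-match accumulator (simpler decomposition).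


-- ===== PORT A =====
def findRevReturns : List (Int × String) → Int
  | [] => (0 : Int)  -- Python's `return False` (== 0 as int) when no line matches
  | (idx, value) :: rest =>
      if PySem.Str.startswith value "Returns" then idx else findRevReturns rest

-- Literal port of A: scan reversed(list(enumerate(lines))), return first match's index, else False (0).
def find_insert_pos_for_kwargs (lines : List String) : Int :=
  findRevReturns (PySem.List.enumerate lines).reverse

-- ===== PORT B =====
-- Port of B: one forward pass; accumulator starts at False (0), overwritten by each matching index.
def find_insert_pos_for_kwargs_alt (lines : List String) : Int :=
  (PySem.List.enumerate lines).foldl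
    (fun pos p => if PySem.Str.startswith p.2 "Returns" then p.1 else pos) (0 : Int)

-- ===== PRECONDITION & SPEC =====
-- Pre_ excludes inputs with no line starting with 'Returns': there A returns the bool False, not an int.
def Pre_find_insert_pos_for_kwargs (lines : List String) : Prop :=
  (lines.any (fun v => PySem.Str.startswith v "Returns")) = true
instance (lines : List String) : Decidable (Pre_find_insert_pos_for_kwargs lines) := by
  unfold Pre_find_insert_pos_for_kwargs; infer_instance
def pvWitness_find_insert_pos_for_kwargs : List String := ["Returns the index"]

def Spec_find_insert_pos_for_kwargs (lines : List String) (out : Int) : Prop := out = find_insert_pos_for_kwargs_alt lines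
instance (lines : List String) (out : Int) : Decidable (Spec_find_insert_pos_for_kwargs lines out) := by unfold Spec_find_insert_pos_for_kwargs; infer_instance

-- ===== CLAIM (what is proved, stated in full; the proofs are below) =====
def Claim_equal_find_insert_pos_for_kwargs : Prop := ∀ (lines : List String), Dom_find_insert_pos_for_kwargs lines → Pre_find_insert_pos_for_kwargs lines → Spec_find_insert_pos_for_kwargs lines (find_insert_pos_for_kwargs lines)

-- ===== LEMMAS AND PROOFS =====

-- ===== VERDICT (by name: the statement is the Claim_ definition above) =====
theorem rev_eq_foldl (l : List (Int × String)) :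
    findRevReturns l.reverse =
      l.foldl (fun pos p => if PySem.Str.startswith p.2 "Returns" then p.1 else pos) (0 : Int) := by
  induction l using List.reverseRecOn with
  | nil => rfl
  | append_singleton l x ih =>
      obtain ⟨i, v⟩ := x
      simp only [List.reverse_append, List.reverse_singleton, List.singleton_append,
        List.foldl_append, List.foldl_cons, List.foldl_nil, findRevReturns, ih]

theorem find_insert_pos_for_kwargs_spec : Claim_equal_find_insert_pos_for_kwargs := by
  intro lines _ _
  unfold Spec_find_insert_pos_for_kwargs find_insert_pos_for_kwargs find_insert_pos_for_kwargs_alt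
  exact rev_eq_foldl _
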